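-- pv_equiv track=rewrite | github.com/erscott/varcover | varcover/src/varcover_preprocess.py | clean_alt
-- ===== SOURCE A (Python) =====
-- def clean_alt(ref_a1_a2_phase):
--     '''
--     This function cleans the ALT and GT columns of multi-allelic
--     variants
--
--     '''
--     ref, a1, a2, phase = ref_a1_a2_phase
--     newAlt = []
--     newGT = []
--     for n,allele in enumerate([a1,a2]):
--         if allele != ref:
--             if allele not in newAlt:
--                 newAlt.append(allele)
--                 newGT.append(str(len(newAlt)))
--                 continue
--             else:
--                 newGT.append(str(len(newAlt)))
--                 continue
--         newGT.append('0')
--     return (','.join(newAlt), newGT[0], newGT[1])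
-- ===== SOURCE B (Python) =====
-- def clean_alt(ref_a1_a2_phase):
--     ref, a1, a2, phase = ref_a1_a2_phase
--     alt = []
--     for allele in (a1, a2):
--         if allele != ref and allele not in alt:
--             alt.append(allele)
--     gt = ['0' if allele == ref else str(alt.index(allele) + 1)
--           for allele in (a1, a2)]
--     return (','.join(alt), gt[0], gt[1])
-- ===== Notes on version B (the rewrite author's own statement) =====
-- stated objective: simpler
-- what changed: Two separate passes: first build the distinct ALT list, then emit genotypes by lookup (alt.index+1) in a comprehension, instead of A's single interleaved loop maintaining two parallel lists with continue branches.
import Mathlib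
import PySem

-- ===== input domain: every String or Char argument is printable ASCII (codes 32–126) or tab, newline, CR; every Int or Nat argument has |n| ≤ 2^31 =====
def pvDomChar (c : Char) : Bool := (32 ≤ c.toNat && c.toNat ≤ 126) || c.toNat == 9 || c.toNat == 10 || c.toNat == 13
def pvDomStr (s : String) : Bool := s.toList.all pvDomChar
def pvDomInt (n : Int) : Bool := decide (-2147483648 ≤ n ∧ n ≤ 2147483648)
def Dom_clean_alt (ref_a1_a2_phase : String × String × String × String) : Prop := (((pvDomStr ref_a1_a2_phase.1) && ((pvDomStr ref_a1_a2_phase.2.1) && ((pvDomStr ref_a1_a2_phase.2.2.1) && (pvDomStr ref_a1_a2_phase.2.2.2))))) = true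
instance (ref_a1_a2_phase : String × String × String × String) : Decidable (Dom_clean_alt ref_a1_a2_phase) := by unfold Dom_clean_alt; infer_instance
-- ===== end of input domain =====

-- B separates ALT-table construction from genotype emission (two passes) instead of A's
-- single interleaved loop; objective: simpler. Return values proved equal on all of Dom.

-- ===== PORT A =====
-- one loop iteration of A over state (newAlt, newGT)
def cleanAltStepA (ref : String) (s : List String × List String) (allele : String) :
    List String × List String :=
  if allele ≠ ref then
    if allele ∉ s.1 then
      let newAlt := s.1 ++ [allele]
      (newAlt, s.2 ++ [PySem.Int.toStr (Int.ofNat newAlt.length)])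
    else
      (s.1, s.2 ++ [PySem.Int.toStr (Int.ofNat s.1.length)])
  else
    (s.1, s.2 ++ ["0"])

def clean_alt (ref_a1_a2_phase : String × String × String × String) : String × String × String :=
  match ref_a1_a2_phase with
  | (ref, a1, a2, _phase) =>
    let s := List.foldl (cleanAltStepA ref) ([], []) [a1, a2]
    (PySem.Str.join "," s.1,
     (PySem.List.pyGet? s.2 0).getD "",   -- newGT[0]; the loop always appends twice, so in range
     (PySem.List.pyGet? s.2 1).getD "")

-- ===== PORT B =====
def clean_alt_alt (ref_a1_a2_phase : String × String × String × String) : String × String × String :=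
  match ref_a1_a2_phase with
  | (ref, a1, a2, _phase) =>
    let alt := List.foldl
      (fun acc allele => if allele ≠ ref ∧ allele ∉ acc then acc ++ [allele] else acc)
      [] [a1, a2]
    let gt := [a1, a2].map (fun allele =>
      if allele = ref then "0"
      else PySem.Int.toStr (Int.ofNat ((PySem.List.index? alt allele).getD 0 + 1)))
    (PySem.Str.join "," alt,
     (PySem.List.pyGet? gt 0).getD "",
     (PySem.List.pyGet? gt 1).getD "")

-- ===== PRECONDITION & SPEC =====
def Spec_clean_alt (ref_a1_a2_phase : String × String × String × String) (out : String × String × String) : Prop := out = clean_alt_alt ref_a1_a2_phase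
instance (ref_a1_a2_phase : String × String × String × String) (out : String × String × String) : Decidable (Spec_clean_alt ref_a1_a2_phase out) := by unfold Spec_clean_alt; infer_instance

-- ===== CLAIM (what is proved, stated in full; the proofs are below) =====
def Claim_equal_clean_alt : Prop := ∀ (ref_a1_a2_phase : String × String × String × String), Dom_clean_alt ref_a1_a2_phase → Spec_clean_alt ref_a1_a2_phase (clean_alt ref_a1_a2_phase)

-- ===== LEMMAS AND PROOFS =====

-- ===== VERDICT (by name: the statement is the Claim_ definition above) =====
theorem clean_alt_spec : Claim_equal_clean_alt := by
  rintro ⟨ref, a1, a2, ph⟩ _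
  show clean_alt _ = clean_alt_alt _
  by_cases h1 : a1 = ref <;> by_cases h2 : a2 = ref <;> by_cases h12 : a2 = a1 <;>
    simp [clean_alt, clean_alt_alt, cleanAltStepA, h1, h2, h12,
      PySem.List.pyGet?, PySem.List.pyIdx?,
      PySem.List.index?, List.idxOf?, List.findIdx?, List.findIdx?.go] <;>
    simp [if_neg (fun h : a1 = a2 => h12 h.symm)]
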